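/- GENERATED by tools/from_farm_form.py from farm/worked/qsort/Proof.lean (a worked proof of the farm's unit `qsort`,
   accepted by the verdict) — do not edit. -/
import Asan.CheckWalk
import ProgX.Base.Spec.Units.qsort

open X86 X86.User Asan ProgX.Base ProgX.Base.Spec

set_option maxRecDepth 4000
set_option maxHeartbeats 4000000

namespace ProgX.Base.Spec.Proved.qsort
open ProgX.Base.Spec.qsort (Statement)

/-- The counter of a loop that counts down, after `sub r, 1`: the word of `i - 1` (for `i ≥ 1`). -/
theorem ofNat_sub_one_w (i : Nat) (hi : 0 < i) : UInt64.ofNat i - 1 = UInt64.ofNat (i - 1) := by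
  obtain ⟨k, rfl⟩ : ∃ k, i = k + 1 := ⟨i - 1, by omega⟩
  rw [UInt64.ofNat_add, Nat.add_sub_cancel]
  show UInt64.ofNat k + 1 - 1 = UInt64.ofNat k
  exact UInt64.add_sub_cancel _ _

end ProgX.Base.Spec.Proved.qsort

/-- `qsort(base, n, w, cmp)` satisfies its contract: the `n < 2` path returns at once; otherwise five pushes, the first loop
(0x1018fa: `sift_down(base, i - 1, n)` for `i = n/2 … 1`, measure `i`), the second loop (0x101934: `swap_bytes(base,
base + end·w, w) ; sift_down(base, 0, end)` for `end = n - 1 … 1`, measure `end`), five pops, `ret`. Both loops carry the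
same invariant: the footprint (`hsame`), no shadow byte written (`hun`), record-preservation (`hrec`), the six stack slots,
DF and the MXCSR masks. The second loop is nested in the exit path of the first (`u_loop` without a postcondition). -/
theorem ProgX.Base.Spec.Proved.qsort_ok : ProgX.Base.Spec.qsort.Statement := by
  intro Lay hLay μ hμ u₀ hcode h_sift h_swap others frames cmp w hcmp u ret he hpre
  v_entry he
  obtain ⟨hsh, hpre2⟩ := hpre
  have hsift := h_sift others frames cmp w hcmp
  have hswap := h_swap others frames
  have hsp := hsh.rsp
  -- 0x1018c0 (libc.c:92 `if (n < 2)`): both arms of the `jbe`; the pushes, up to the head of the first loop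
  u_walk hcode [hμ.vendor] until [ProgX.Base.L.qsort.loop1] span [ProgX.Base.L.textLo, ProgX.Base.L.textHi] side (v_side)
  · -- 0x101942 (libc.c:102): `n < 2`, the `ret` at once: nothing was written
    refine ReachVia.done ?_
    v_returned
    refine ⟨by v_untouched, ?_⟩
    rw [w_mem]
    exact ProgX.Base.Spec.RecordsKept.refl _ _ _ _
  · -- 0x1018fa (libc.c:95 `for (i = n / 2; i > 0; i--)`): the head of the first loop
    obtain ⟨hcmpE, hwE, hw0, hwn, hlive⟩ := hpre2.resolve_left (by omega)
    -- where the array is: one arithmetic fact (data space, off the text, off this function's stack)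
    have hwhere := hlive.where_ hsh.inv hsh.offText (by
      have : 0 < UInt64.toNat (u.reg Reg.rsi) := by omega
      exact Nat.mul_pos hw0 this)
    -- what varies is generalised (`r13 = i ≤ n/2`), the exact memory is replaced by what stays true
    obtain ⟨i, hi, hile⟩ : ∃ i : Nat, s_1018e0.reg .r13 = UInt64.ofNat i ∧ 2 * i ≤ (u.reg .rsi).toNat := by
      refine ⟨(u.reg .rsi >>> 1).toNat, ?_, ?_⟩
      · rw [w_r13, UInt64.ofNat_toNat]
      · u_omega
    have hsame : Mem.SameExcept [⟨(u.reg .rsp).toNat - 224, (u.reg .rsp).toNat⟩,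
        ⟨(u.reg .rdi).toNat, (u.reg .rdi).toNat + w * (u.reg .rsi).toNat⟩] u.mem s_1018e0.mem := by
      u_same
    have hun : ShadowUntouched u.mem s_1018e0.mem := by v_untouched
    have hrec : RecordsKept u.mem s_1018e0.mem (u.reg .rdi).toNat w (u.reg .rsi).toNat := by
      apply RecordsKept.of_eqOn (by omega)
      u_memnorm
      u_eqon
    have hs1 : UInt64.ofNat (s_1018e0.mem.readLE (u.reg .rsp - 8) 8) = u.reg .r14 := by u_resolve
    have hs2 : UInt64.ofNat (s_1018e0.mem.readLE (u.reg .rsp - 16) 8) = u.reg .r13 := by u_resolve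
    have hs3 : UInt64.ofNat (s_1018e0.mem.readLE (u.reg .rsp - 24) 8) = u.reg .r12 := by u_resolve
    have hs4 : UInt64.ofNat (s_1018e0.mem.readLE (u.reg .rsp - 32) 8) = u.reg .rbp := by u_resolve
    have hs5 : UInt64.ofNat (s_1018e0.mem.readLE (u.reg .rsp - 40) 8) = u.reg .rbx := by u_resolve
    have hs0 : UInt64.ofNat (s_1018e0.mem.readLE (u.reg .rsp) 8) = ret := by u_resolve
    have hdf : s_1018e0.flags .df = false := by
      rw [w_flags]
      simp only [X86.User.df_setStatus]
      exact he_df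
    have hmx : s_1018e0.mxcsr &&& 8064 = 8064 := by
      rw [w_mxcsr]
      exact he_mx
    replace w_kept := w_kept.mono_all (S' := [.rax, .rcx, .rdx, .rsi, .rdi, .rsp, .r8, .r9, .r10, .r11,
   .r16, .r17, .r18, .r19, .r20, .r21, .r22, .r23, .r24, .r25, .r26, .r27, .r28, .r29, .r30, .r31, .r13, .r14, .r12, .rbx, .rbp]) (by rfl)
    clear w_mem w_flags w_r13 w_mxcsr
    u_loop [i] (fun v => (v.reg .r13).toNat)
    u_walk hcode [hμ.vendor] until [ProgX.Base.L.qsort.loop1, ProgX.Base.L.qsort.loop2] span [ProgX.Base.L.textLo, ProgX.Base.L.textHi] side (v_side)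
    · -- 0x1018f5 (libc.c:96), call_inv: DF and the MXCSR masks at the entry of `sift_down`
      show X86.User.abiInv _
      refine ProgX.Base.abiInv_of ?_ ?_
      · rw [w_flags]
        simp only [X86.User.df_setStatus]
        exact hdf
      · rw [w_mxcsr]
        exact hmx
    · -- 0x1018f5 (libc.c:96): the precondition of `sift_down(base, i - 1, n, w, cmp)`, `i - 1 ≤ n`
      have hun' : ShadowUntouched u.mem s_1018f5.mem := by v_untouched
      have hi0 : 0 < i := by u_omega
      rw [ProgX.Base.Spec.Proved.qsort.ofNat_sub_one_w i hi0] at w_rsi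
      refine ⟨⟨?_, hsh.offText⟩, w_r8, ?_, hw0, ?_, ?_, ?_⟩
      · rw [w_rsp]
        exact (hsh.inv.untouched hun').lower (by u_omega) (by u_omega) (by u_omega)
      · rw [w_rcx]
        exact hwE
      · rw [w_rsi, w_rdx]
        u_omega
      · rw [w_rdx]
        exact hwn
      · rw [w_rdx, w_rdi]
        exact hlive
    · -- 0x1018fa = the return address of the call: the back edge of the first loop, with `i - 1`
      have hi0 : 0 < i := by u_omega
      obtain ⟨hpun, hprec⟩ := w_post
      rw [w_rdi_1018f5, w_rdx_1018f5] at hprec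
      simp only [X86.User.Spec.footprint, vspec, w_rsp_1018f5, w_rdi_1018f5, w_rdx_1018f5] at w_same
      rw [w_mem_1018f5] at w_same
      have w_eq := ProgX.Base.conv_code_eqOn w_code
      rw [ProgX.Base.Spec.Proved.qsort.ofNat_sub_one_w i hi0] at w_r13
      have hun1 : ShadowUntouched s_1018e0.mem s_1018f5.mem := by
        rw [w_mem_1018f5]
        unfold Asan.ShadowUntouched
        u_eqon
      have hrec1 : RecordsKept s_1018e0.mem s_1018f5.mem (u.reg .rdi).toNat w (u.reg .rsi).toNat := by
        apply RecordsKept.of_eqOn (by omega)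
        rw [w_mem_1018f5]
        u_eqon
      u_loop_back [i - 1]
      · omega
      · -- no shadow byte written: the loop so far, the push of the return address, the callee
        exact (hun.trans hun1).trans hpun
      · -- the records: the loop so far, the push (off the array), `sift_down`'s post
        exact (hrec.trans hrec1).trans hprec
      · u_frame hs1
      · u_frame hs2
      · u_frame hs3
      · u_frame hs4
      · u_frame hs5
      · u_frame hs0
      · exact (show X86.User.abiInv _ from w_inv).1
      · exact (show X86.User.abiInv _ from w_inv).2
      · -- the measure: `i - 1 < i`
        rw [w_r13]
        u_omega
    · -- 0x1018ff (libc.c:98 `for (end = n - 1; end > 0; end--)`): the exit of the first loop, `sub rbx, 1 ; jmp` to the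
      -- head of the second loop, 0x101934. The invariant of the first loop is that of the second (`rbx = end < n`).
      rw [← w_mem] at hsame hun hrec hs0 hs1 hs2 hs3 hs4 hs5
      have hdf2 : s_101903.flags .df = false := by
        rw [w_flags]
        simp only [X86.User.df_setStatus]
        exact hdf
      have hmx2 : s_101903.mxcsr &&& 8064 = 8064 := by
        rw [w_mxcsr]
        exact hmx
      obtain ⟨e, he1, hele⟩ : ∃ e : Nat, s_101903.reg .rbx = UInt64.ofNat e ∧ e < (u.reg .rsi).toNat := by
        refine ⟨(u.reg .rsi).toNat - 1, ?_, by omega⟩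
        rw [w_rbx, ← ProgX.Base.Spec.Proved.qsort.ofNat_sub_one_w _ (by omega), UInt64.ofNat_toNat]
      clear w_mem w_flags w_mxcsr w_rbx w_r13 hdf hmx hi hile hbr_1018fd
      u_loop [e] (fun v => (v.reg .rbx).toNat)
      -- pure facts about the record `end` (products of two variables are not linear: stated once, here)
      have hwe : w * e + w ≤ w * (u.reg .rsi).toNat := by
        have h1 : w * (e + 1) ≤ w * (u.reg .rsi).toNat := Nat.mul_le_mul_left w hele
        rw [Nat.mul_succ] at h1
        exact h1
      have hnlt := (u.reg .rsi).toNat_lt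
      have hte : (UInt64.ofNat e).toNat = e := X86.User.Code.toNat_ofNat_lt e (by omega)
      have haddr : (UInt64.ofNat e * u.reg .rdx + u.reg .rdi).toNat = (u.reg .rdi).toNat + w * e := by
        have h1 := RecordsKept.toNat_record_addr (u.reg .rdi) (UInt64.ofNat e) (u.reg .rdx) (n := (u.reg .rsi).toNat) hwE
          (by omega) (by omega)
        rw [hte] at h1
        exact h1
      u_walk hcode [hμ.vendor] until [ProgX.Base.L.qsort.loop2] span [ProgX.Base.L.textLo, ProgX.Base.L.textHi] side (v_side)
      · -- 0x101915 (libc.c:99), call_inv: DF and the MXCSR masks at the entry of `swap_bytes`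
        show X86.User.abiInv _
        refine ProgX.Base.abiInv_of ?_ ?_
        · rw [w_flags]
          simp only [X86.User.df_setStatus]
          exact hdf2
        · rw [w_mxcsr]
          exact hmx2
      · -- 0x101915 (libc.c:99): the precondition of `swap_bytes(base, base + end * w, w)`: records 0 and `end ≥ 1`
        have hun' : ShadowUntouched u.mem s_101915.mem := by v_untouched
        have he0 : 0 < e := by omega
        refine ⟨⟨?_, hsh.offText⟩, ?_, ?_, Or.inl ?_⟩
        · rw [w_rsp]
          exact (hsh.inv.untouched hun').lower (by u_omega) (by u_omega) (by u_omega)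
        · rw [w_rdi, w_rdx, hwE]
          exact hlive.sub _ _ (Nat.le_refl _) (by omega)
        · rw [w_rsi, w_rdx, hwE, haddr]
          exact hlive.sub _ _ (by omega) (by omega)
        · rw [w_rsi, w_rdi, w_rdx, hwE, haddr]
          have : w * 1 ≤ w * e := Nat.mul_le_mul_left w he0
          omega
      · -- 0x10191a (libc.c:100): after the return of `swap_bytes`. What its contract says (the post and the footprint speak
        -- of its entry state `s_101915`) is restated for the returned state, in terms of OUR entry state, before walking on
        have he0 : 0 < e := by omega
        obtain ⟨hpunA, hpab, hpba⟩ := w_post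
        rw [w_rdx_101915, hwE] at hpab hpba
        rw [w_rdi_101915, w_rsi_101915] at hpab hpba
        simp only [X86.User.Spec.footprint, vspec, w_rsp_101915, w_rdi_101915, w_rsi_101915, w_rdx_101915, hwE] at w_same
        -- the records: `swap_bytes` exchanged records 0 and `end`
        have hrecA : RecordsKept s_101915.mem s_101915r.mem (u.reg .rdi).toNat w (u.reg .rsi).toNat := by
          refine RecordsKept.of_swap_bytes (i := 0) (j := e) (by omega) hele (by omega) haddr (by omega) hpab hpba w_same ?_
          show (u.reg Reg.rsp - 48).toNat ≤ _ ∨ _ ≤ (u.reg Reg.rsp - 48).toNat - 96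
          u_omega
        have hrec0 : RecordsKept s_101903.mem s_101915.mem (u.reg .rdi).toNat w (u.reg .rsi).toNat := by
          apply RecordsKept.of_eqOn (by omega)
          rw [w_mem_101915]
          u_eqon
        have hun0 : ShadowUntouched s_101903.mem s_101915.mem := by
          rw [w_mem_101915]
          unfold Asan.ShadowUntouched
          u_eqon
        -- (the callee's footprint over the nest of stores: `u_frame` / `u_same` read through it; the stack slots are taken
        -- BEFORE `hsameA` exists: `u_eqon` picks the latest `SameExcept` fact about this memory)
        rw [w_mem_101915] at w_same
        have hunA : ShadowUntouched u.mem s_101915r.mem := (hun.trans hun0).trans hpunA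
        have hrecB : RecordsKept u.mem s_101915r.mem (u.reg .rdi).toNat w (u.reg .rsi).toNat :=
          (hrec.trans hrec0).trans hrecA
        have hs1A : UInt64.ofNat (s_101915r.mem.readLE (u.reg .rsp - 8) 8) = u.reg .r14 := by u_frame hs1
        have hs2A : UInt64.ofNat (s_101915r.mem.readLE (u.reg .rsp - 16) 8) = u.reg .r13 := by u_frame hs2
        have hs3A : UInt64.ofNat (s_101915r.mem.readLE (u.reg .rsp - 24) 8) = u.reg .r12 := by u_frame hs3
        have hs4A : UInt64.ofNat (s_101915r.mem.readLE (u.reg .rsp - 32) 8) = u.reg .rbp := by u_frame hs4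
        have hs5A : UInt64.ofNat (s_101915r.mem.readLE (u.reg .rsp - 40) 8) = u.reg .rbx := by u_frame hs5
        have hs0A : UInt64.ofNat (s_101915r.mem.readLE (u.reg .rsp) 8) = ret := by u_frame hs0
        have hsameA : Mem.SameExcept [⟨(u.reg .rsp).toNat - 224, (u.reg .rsp).toNat⟩,
            ⟨(u.reg .rdi).toNat, (u.reg .rdi).toNat + w * (u.reg .rsi).toNat⟩] u.mem s_101915r.mem := by
          u_same
        have hdfA : s_101915r.flags .df = false := (show X86.User.abiInv _ from w_inv).1
        have hmxA : s_101915r.mxcsr &&& 8064 = 8064 := (show X86.User.abiInv _ from w_inv).2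
        have w_eq := ProgX.Base.conv_code_eqOn w_code
        clear w_same hpab hpba hrecA hrec0 hun0 hpunA
        u_walk hcode [hμ.vendor] until [ProgX.Base.L.qsort.loop2] span [ProgX.Base.L.textLo, ProgX.Base.L.textHi] side (v_side)
        · -- 0x10192b (libc.c:100), call_inv: DF and the MXCSR masks at the entry of `sift_down`
          show X86.User.abiInv _
          refine ProgX.Base.abiInv_of ?_ ?_
          · rw [w_flags]
            exact hdfA
          · rw [w_mxcsr]
            exact hmxA
        · -- 0x10192b (libc.c:100): the precondition of `sift_down(base, 0, end, w, cmp)`: the first `end` records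
          have hun' : ShadowUntouched u.mem s_10192b.mem := by v_untouched
          refine ⟨⟨?_, hsh.offText⟩, w_r8, ?_, hw0, ?_, ?_, ?_⟩
          · rw [w_rsp]
            exact (hsh.inv.untouched hun').lower (by u_omega) (by u_omega) (by u_omega)
          · rw [w_rcx]
            exact hwE
          · rw [w_rsi, w_rdx, ProgX.Base.toNat_ofBV32]
            exact Nat.zero_le _
          · rw [w_rdx, hte]
            omega
          · rw [w_rdx, w_rdi, hte]
            exact hlive.sub _ _ (Nat.le_refl _) (by omega)
        · -- 0x101930 (libc.c:98): after the return of `sift_down`: its contract restated, then `sub rbx, 1` and the back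
          -- edge of the second loop (0x101934), with `end - 1`
          obtain ⟨hpunB, hprecB⟩ := w_post
          rw [w_rdi_10192b, w_rdx_10192b, hte] at hprecB
          simp only [X86.User.Spec.footprint, vspec, w_rsp_10192b, w_rdi_10192b, w_rdx_10192b, hte] at w_same
          have hrec1 : RecordsKept s_101915r.mem s_10192b.mem (u.reg .rdi).toNat w (u.reg .rsi).toNat := by
            apply RecordsKept.of_eqOn (by omega)
            rw [w_mem_10192b]
            u_eqon
          have hrec2 : RecordsKept s_10192b.mem s_10192br.mem (u.reg .rdi).toNat w (u.reg .rsi).toNat := by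
            -- the first `end` records were rearranged, the others not touched
            refine hprecB.extend_same (by omega) (by omega) w_same ?_
            show (u.reg Reg.rsp - 48).toNat ≤ _ ∨ _ ≤ (u.reg Reg.rsp - 48).toNat - 176
            u_omega
          have hun1 : ShadowUntouched s_101915r.mem s_10192b.mem := by
            rw [w_mem_10192b]
            unfold Asan.ShadowUntouched
            u_eqon
          rw [w_mem_10192b] at w_same
          have hs1B : UInt64.ofNat (s_10192br.mem.readLE (u.reg .rsp - 8) 8) = u.reg .r14 := by u_frame hs1A
          have hs2B : UInt64.ofNat (s_10192br.mem.readLE (u.reg .rsp - 16) 8) = u.reg .r13 := by u_frame hs2A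
          have hs3B : UInt64.ofNat (s_10192br.mem.readLE (u.reg .rsp - 24) 8) = u.reg .r12 := by u_frame hs3A
          have hs4B : UInt64.ofNat (s_10192br.mem.readLE (u.reg .rsp - 32) 8) = u.reg .rbp := by u_frame hs4A
          have hs5B : UInt64.ofNat (s_10192br.mem.readLE (u.reg .rsp - 40) 8) = u.reg .rbx := by u_frame hs5A
          have hs0B : UInt64.ofNat (s_10192br.mem.readLE (u.reg .rsp) 8) = ret := by u_frame hs0A
          have hsameB : Mem.SameExcept [⟨(u.reg .rsp).toNat - 224, (u.reg .rsp).toNat⟩,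
              ⟨(u.reg .rdi).toNat, (u.reg .rdi).toNat + w * (u.reg .rsi).toNat⟩] u.mem s_10192br.mem := by
            u_same
          have hunB : ShadowUntouched u.mem s_10192br.mem := (hunA.trans hun1).trans hpunB
          have hrecC : RecordsKept u.mem s_10192br.mem (u.reg .rdi).toNat w (u.reg .rsi).toNat :=
            (hrecB.trans hrec1).trans hrec2
          have hdfB : s_10192br.flags .df = false := (show X86.User.abiInv _ from w_inv).1
          have hmxB : s_10192br.mxcsr &&& 8064 = 8064 := (show X86.User.abiInv _ from w_inv).2
          have w_eq := ProgX.Base.conv_code_eqOn w_code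
          clear w_same hprecB hrec1 hrec2 hun1 hpunB
          u_walk hcode [hμ.vendor] until [ProgX.Base.L.qsort.loop2] span [ProgX.Base.L.textLo, ProgX.Base.L.textHi] side (v_side)
          -- 0x101934: the invariant again (`sub` stored nothing: the facts about the memory are those of the returned state)
          rw [← w_mem] at hs0B hs1B hs2B hs3B hs4B hs5B hsameB hunB hrecC
          rw [ProgX.Base.Spec.Proved.qsort.ofNat_sub_one_w e he0] at w_rbx
          u_loop_back [e - 1]
          · -- the direction flag: the callee returned it clear, `sub` writes status flags only
            rw [w_flags]
            simp only [X86.User.df_setStatus]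
            exact hdfB
          · rw [w_mxcsr]
            exact hmxB
          · omega
          · -- the measure: `end - 1 < end`
            rw [w_rbx, hte, X86.User.Code.toNat_ofNat_lt (e - 1) (by omega)]
            omega
      · -- 0x101939 … 0x101941 (libc.c:102): the exit of the second loop, five pops, the `ret`: the contract's `Returned`
        refine ReachVia.done (Or.inl (Or.inl ?_))
        refine X86.User.Returned.mk w_rip w_rsp (by u_saved) ?_ (ProgX.Base.conv_code_in w_eq) ?_ ⟨?_, ?_⟩
        · -- the footprint
          simp only [X86.User.Spec.footprint, vspec]
          u_same
        · -- DF and the MXCSR masks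
          show X86.User.abiInv _
          refine ProgX.Base.abiInv_of ?_ ?_
          · rw [w_flags]
            simp only [X86.User.df_setStatus]
            exact hdf2
          · rw [w_mxcsr]
            exact hmx2
        · rw [w_mem]
          exact hun
        · rw [w_mem]
          exact hrec
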